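-- pv_equiv track=rewrite | github.com/IgrMd/yandex-algos-training | Тренировки по алгоритмам 1.0/Лекция 3. «Множества»/I.py | languages
-- ===== SOURCE A (Python) =====
-- def languages(n, students):
--     any_student = set()
--     for student in students:
--         any_student.update(student)
--     every_student = any_student.copy()
--     for student in students:
--         every_student.intersection_update(student)
--     return any_student, every_student
-- ===== SOURCE B (Python) =====
-- def languages(n, students):
--     # One counting pass: how many students know each language (dedup per student).
--     counts = {}
--     for student in students:
--         for lang in set(student):
--             counts[lang] = counts.get(lang, 0) + 1
--     union = set(counts)
--     inter = {lang for lang, c in counts.items() if c == len(students)}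
--     return union, inter
-- ===== Notes on version B (the rewrite author's own statement) =====
-- stated objective: alternative
-- what changed: Replaces A's two set-fold passes (union via update, then repeated intersection_update over the union) with a single counting pass into a dict of per-student occurrence counts; the union is the key set and the intersection is the keys counted len(students) times.
import Mathlib
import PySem

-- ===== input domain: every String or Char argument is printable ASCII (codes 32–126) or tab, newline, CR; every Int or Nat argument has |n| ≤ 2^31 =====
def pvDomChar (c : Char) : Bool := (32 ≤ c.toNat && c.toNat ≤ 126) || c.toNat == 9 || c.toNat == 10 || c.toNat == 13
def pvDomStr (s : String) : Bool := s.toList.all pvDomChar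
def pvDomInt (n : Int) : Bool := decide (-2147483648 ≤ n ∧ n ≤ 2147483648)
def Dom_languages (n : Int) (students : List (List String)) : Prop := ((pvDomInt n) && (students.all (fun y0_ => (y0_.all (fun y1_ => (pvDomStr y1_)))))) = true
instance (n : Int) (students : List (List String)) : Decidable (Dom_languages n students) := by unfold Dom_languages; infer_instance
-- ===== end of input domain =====

-- B replaces A's two set-fold passes with a single counting pass (dict of per-student
-- occurrence counts); same values everywhere, alternative algorithm of similar cost.
-- ===== PORT A =====
def languages (n : Int) (students : List (List String)) : List String × List String :=
  let any_student : PySem.Set String :=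
    students.foldl (fun s student => PySem.Set.update s student) PySem.Set.empty
  let every_student : PySem.Set String :=
    students.foldl (fun s student => PySem.Set.inter s (PySem.Set.ofList student)) any_student
  (any_student, every_student)

-- ===== PORT B =====
def languages_alt (n : Int) (students : List (List String)) : List String × List String :=
  let counts : PySem.Dict String Int :=
    students.foldl
      (fun d student =>
        (PySem.Set.ofList student).foldl (fun d lang => d.insert lang (d.getD lang 0 + 1)) d)
      PySem.Dict.empty
  let union : PySem.Set String := PySem.Set.ofList counts.keys
  let inter : PySem.Set String :=
    counts.items.foldl
      (fun s p => if p.2 == (students.length : Int) then PySem.Set.add s p.1 else s)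
      PySem.Set.empty
  (union, inter)

-- ===== PRECONDITION & SPEC =====
def Spec_languages (n : Int) (students : List (List String)) (out : List String × List String) : Prop := out = languages_alt n students
instance (n : Int) (students : List (List String)) (out : List String × List String) : Decidable (Spec_languages n students out) := by unfold Spec_languages; infer_instance

-- ===== CLAIM (what is proved, stated in full; the proofs are below) =====
def Claim_equal_languages : Prop := ∀ (n : Int) (students : List (List String)), Dom_languages n students → Spec_languages n students (languages n students)

-- ===== LEMMAS AND PROOFS =====

-- B's nested counting loop is Counter over the per-student-deduped flattening.
theorem pv_counts_eq (students : List (List String)) :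
    students.foldl
      (fun d student =>
        (PySem.Set.ofList student).foldl (fun d lang => d.insert lang (d.getD lang 0 + 1)) d)
      PySem.Dict.empty
    = PySem.Dict.counter (students.flatMap (fun st => PySem.Set.ofList st)) := by
  rw [← PySem.Dict.foldl_insert_getD_add_one_eq_counter, List.foldl_flatMap]

-- A's union loop is set(flatten students).
theorem pv_foldl_update (students : List (List String)) (s : PySem.Set String) :
    students.foldl (fun s student => PySem.Set.update s student) s
      = PySem.Set.update s students.flatten := by
  induction students generalizing s with
  | nil => simp [PySem.Set.update]
  | cons st rest ih => simp [List.foldl_cons, ih, PySem.Set.update_append]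

-- updating with set(st) is the same as updating with st.
theorem pv_update_ofList (s : PySem.Set String) (st : List String) :
    PySem.Set.update s (PySem.Set.ofList st) = PySem.Set.update s st := by
  rw [PySem.Set.update_eq_append_filter, PySem.Set.update_eq_append_filter,
    PySem.Set.ofList_ofList]

theorem pv_update_flatMap (l : List (List String)) (s : PySem.Set String) :
    PySem.Set.update s (l.flatMap (fun st => PySem.Set.ofList st))
      = PySem.Set.update s l.flatten := by
  induction l generalizing s with
  | nil => rfl
  | cons st rest ih =>
      simp only [List.flatMap_cons, List.flatten_cons, PySem.Set.update_append,
        pv_update_ofList, ih]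

theorem pv_union_eq (students : List (List String)) :
    PySem.Set.ofList (students.flatMap (fun st => PySem.Set.ofList st))
      = PySem.Set.ofList students.flatten := by
  rw [← PySem.Set.update_nil_left, ← PySem.Set.update_nil_left, pv_update_flatMap]

theorem pv_contains_ofList (st : List String) (x : String) :
    (PySem.Set.ofList st).contains x = PySem.Set.contains st x := by
  rw [Bool.eq_iff_iff, PySem.Set.contains_iff, PySem.Set.contains_iff,
    PySem.Set.mem_ofList]

-- A's intersection loop filters its start set by membership in every student.
theorem pv_foldl_inter (students : List (List String)) (s : PySem.Set String) :
    students.foldl (fun s student => PySem.Set.inter s (PySem.Set.ofList student)) s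
      = s.filter (fun x => students.all (fun st => PySem.Set.contains st x)) := by
  induction students generalizing s with
  | nil => simp
  | cons st rest ih =>
      rw [List.foldl_cons, ih]
      simp only [PySem.Set.inter, List.filter_filter, List.all_cons]
      apply List.filter_congr
      intro x _
      rw [pv_contains_ofList, Bool.and_comm]

theorem pv_count_ofList (st : List String) (x : String) :
    List.count x (PySem.Set.ofList st) = if PySem.Set.contains st x then 1 else 0 := by
  by_cases h : x ∈ st
  · have hm : x ∈ PySem.Set.ofList st := (PySem.Set.mem_ofList st x).mpr h
    rw [List.count_eq_one_of_mem (PySem.Set.nodup_ofList st) hm,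
      if_pos ((PySem.Set.contains_iff st x).mpr h)]
  · rw [List.count_eq_zero_of_not_mem (fun hc => h ((PySem.Set.mem_ofList st x).mp hc))]
    rw [if_neg (fun hc => h ((PySem.Set.contains_iff st x).mp hc))]

theorem pv_count_le (l : List (List String)) (x : String) :
    List.count x (l.flatMap (fun st => PySem.Set.ofList st)) ≤ l.length := by
  induction l with
  | nil => simp
  | cons st rest ih =>
      simp only [List.flatMap_cons, List.count_append, List.length_cons, pv_count_ofList]
      split <;> omega

-- a language is counted l.length times iff every student knows it.
theorem pv_count_all (l : List (List String)) (x : String) :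
    (List.count x (l.flatMap (fun st => PySem.Set.ofList st)) = l.length)
      ↔ l.all (fun st => PySem.Set.contains st x) = true := by
  induction l with
  | nil => simp
  | cons st rest ih =>
      have hle := pv_count_le rest x
      simp only [List.flatMap_cons, List.count_append, List.length_cons, pv_count_ofList,
        List.all_cons, Bool.and_eq_true, ← ih]
      cases h : PySem.Set.contains st x
      · simp [h]
        omega
      · simp [h]
        omega

-- a conditional-add loop over a fresh nodup list is a filter.
theorem pv_foldl_add_if (l : List String) (p : String → Bool) (s : PySem.Set String)
    (h : (s ++ l).Nodup) :
    l.foldl (fun s x => if p x then PySem.Set.add s x else s) s = s ++ l.filter p := by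
  induction l generalizing s with
  | nil => simp
  | cons x l ih =>
      have hx : x ∉ s := by
        intro hxs
        exact (List.disjoint_of_nodup_append h) hxs List.mem_cons_self
      simp only [List.foldl_cons, List.filter_cons]
      by_cases hp : p x
      · rw [if_pos hp, if_pos hp, PySem.Set.add_of_not_mem hx,
          ih (s ++ [x]) (by simpa using h)]
        simp
      · rw [if_neg hp, if_neg hp]
        exact ih s ((List.sublist_append_left s l |>.append_left s |> fun _ => by
          exact List.Nodup.sublist (List.Sublist.append_left (List.sublist_cons_self x l) s) h))

theorem languages_spec : Claim_equal_languages := by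
  intro n students _
  show languages n students = languages_alt n students
  simp only [languages, languages_alt, pv_counts_eq, PySem.Set.empty]
  set flat := students.flatMap (fun st => PySem.Set.ofList st) with hflat
  have hkeys : (PySem.Dict.counter flat).keys = PySem.Set.ofList flat :=
    PySem.Dict.keys_counter flat
  have hunion : PySem.Set.ofList (PySem.Dict.counter flat).keys
      = students.foldl (fun s student => PySem.Set.update s student) ([] : List String) := by
    rw [hkeys, PySem.Set.ofList_ofList, pv_union_eq, pv_foldl_update]
    exact (PySem.Set.update_nil_left students.flatten).symm
  refine Prod.ext hunion.symm ?_
  -- intersection side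
  rw [pv_foldl_inter, PySem.Dict.items_counter, List.foldl_map]
  have hnd : (([] : List String) ++ PySem.Set.ofList flat).Nodup := by
    simp only [List.nil_append]; exact PySem.Set.nodup_ofList flat
  rw [pv_foldl_add_if (PySem.Set.ofList flat)
      (fun k => ((List.count k flat : Int) == (students.length : Int)))
      ([] : List String) hnd]
  rw [← hunion, hkeys, PySem.Set.ofList_ofList, List.nil_append]
  apply List.filter_congr
  intro x _
  rw [Bool.eq_iff_iff, beq_iff_eq, Int.natCast_inj]
  exact (pv_count_all students x).symm
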